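-- pv_equiv track=rewrite | github.com/panagiota02/panagiota | Panayiota_final/1.py | check_katheta
-- ===== SOURCE A (Python) =====
-- def check_katheta (tetrag, diast): #gia oles tis stiles
--     cnt=0
--     for j in range (0,diast):   #gia kathe stili
--         for j1 in range (0,diast-3):
--            vrika_tetrada=True
--            for j2 in range(j1,j1+4):
--                 if (tetrag[j2][j]//10 != 0):
--                     vrika_tetrada=False
--            if vrika_tetrada == True:
--               cnt+=1
--     return cnt
-- ===== SOURCE B (Python) =====
-- def check_katheta(tetrag, diast):
--     if diast < 4:
--         return 0
--     cnt = 0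
--     for j in range(0, diast):
--         bad = 0
--         for i in range(0, 4):
--             if tetrag[i][j] // 10 != 0:
--                 bad += 1
--         if bad == 0:
--             cnt += 1
--         for i in range(4, diast):
--             if tetrag[i - 4][j] // 10 != 0:
--                 bad -= 1
--             if tetrag[i][j] // 10 != 0:
--                 bad += 1
--             if bad == 0:
--                 cnt += 1
--     return cnt
-- ===== Notes on version B (the rewrite author's own statement) =====
-- stated objective: faster
-- what changed: Replace the per-window rescan of 4 rows by a sliding bad-cell counter per column: initialise the count over rows 0..3, then slide the window down subtracting the leaving row and adding the entering one, counting windows whose bad count is 0.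
import Mathlib
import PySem

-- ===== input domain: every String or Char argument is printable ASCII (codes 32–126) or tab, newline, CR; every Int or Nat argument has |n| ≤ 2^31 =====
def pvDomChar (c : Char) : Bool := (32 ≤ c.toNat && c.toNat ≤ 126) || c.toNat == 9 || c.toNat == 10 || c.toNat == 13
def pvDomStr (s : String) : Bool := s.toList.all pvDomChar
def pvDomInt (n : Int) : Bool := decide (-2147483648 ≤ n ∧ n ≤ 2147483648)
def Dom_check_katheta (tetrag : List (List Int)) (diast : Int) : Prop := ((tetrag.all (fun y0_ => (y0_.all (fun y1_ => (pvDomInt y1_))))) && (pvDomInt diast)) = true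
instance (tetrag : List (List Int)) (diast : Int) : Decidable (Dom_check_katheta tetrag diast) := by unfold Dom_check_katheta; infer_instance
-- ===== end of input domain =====

-- B replaces A's 4-row rescan of every window by a sliding bad-cell counter per column (constant-factor fewer cell reads).

-- ===== PORT A =====
-- tetrag[j2][j] (indices are always nonnegative here; in-range under Pre_)
def pvCellA (tetrag : List (List Int)) (r c : Int) : Int :=
  PySem.List.pyGetD (PySem.List.pyGetD tetrag r []) c 0

def check_katheta (tetrag : List (List Int)) (diast : Int) : Int :=
  (PySem.List.pyRange 0 diast 1).foldl (fun cnt j =>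
    (PySem.List.pyRange 0 (diast - 3) 1).foldl (fun cnt j1 =>
      let vrika :=
        (PySem.List.pyRange j1 (j1 + 4) 1).foldl (fun v j2 =>
          if PySem.Int.floordiv (pvCellA tetrag j2 j) 10 ≠ 0 then false else v) true
      if vrika = true then cnt + 1 else cnt) cnt) 0

-- ===== PORT B =====
def pvCellB (tetrag : List (List Int)) (r c : Int) : Int :=
  PySem.List.pyGetD (PySem.List.pyGetD tetrag r []) c 0

def check_katheta_alt (tetrag : List (List Int)) (diast : Int) : Int :=
  if diast < 4 then 0
  else
    (PySem.List.pyRange 0 diast 1).foldl (fun cnt j =>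
      let bad : Int :=
        (PySem.List.pyRange 0 4 1).foldl (fun bad i =>
          if PySem.Int.floordiv (pvCellB tetrag i j) 10 ≠ 0 then bad + 1 else bad) 0
      let cnt := if bad = 0 then cnt + 1 else cnt
      let p :=
        (PySem.List.pyRange 4 diast 1).foldl (fun (p : Int × Int) i =>
          let bad := if PySem.Int.floordiv (pvCellB tetrag (i - 4) j) 10 ≠ 0 then p.2 - 1 else p.2
          let bad := if PySem.Int.floordiv (pvCellB tetrag i j) 10 ≠ 0 then bad + 1 else bad
          let cnt := if bad = 0 then p.1 + 1 else p.1
          (cnt, bad)) (cnt, bad)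
      p.1) 0

-- ===== PRECONDITION & SPEC =====
-- When diast ≥ 4 the Python indexes tetrag[j2][j] for all j2, j in [0, diast); Pre_ excludes exactly
-- the inputs where that raises IndexError (too few rows, or a used row shorter than diast).
def Pre_check_katheta (tetrag : List (List Int)) (diast : Int) : Prop :=
  diast < 4 ∨ (diast ≤ (tetrag.length : Int) ∧
    ∀ row ∈ tetrag.take diast.toNat, diast ≤ (row.length : Int))
instance (tetrag : List (List Int)) (diast : Int) : Decidable (Pre_check_katheta tetrag diast) := by
  unfold Pre_check_katheta; infer_instance

def pvWitness_check_katheta : List (List Int) × Int :=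
  ([[1, 2, 3, 4], [5, 6, 7, 8], [9, 0, 1, 2], [3, 4, 5, 6]], 4)

def Spec_check_katheta (tetrag : List (List Int)) (diast : Int) (out : Int) : Prop := out = check_katheta_alt tetrag diast
instance (tetrag : List (List Int)) (diast : Int) (out : Int) : Decidable (Spec_check_katheta tetrag diast out) := by unfold Spec_check_katheta; infer_instance

-- ===== CLAIM (what is proved, stated in full; the proofs are below) =====
def Claim_equal_check_katheta : Prop := ∀ (tetrag : List (List Int)) (diast : Int), Dom_check_katheta tetrag diast → Pre_check_katheta tetrag diast → Spec_check_katheta tetrag diast (check_katheta tetrag diast)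

-- ===== LEMMAS AND PROOFS =====

-- number of bad cells in the 4-row window starting at s, for an abstract column predicate f
def pvWnd (f : Int → Prop) [DecidablePred f] (s : Int) : Int :=
  (if f s then 1 else 0) + (if f (s + 1) then 1 else 0) +
  (if f (s + 2) then 1 else 0) + (if f (s + 3) then 1 else 0)

-- number of all-good windows among the n windows starting at s, s+1, …
def pvSpecC (f : Int → Prop) [DecidablePred f] : Nat → Int → Int
  | 0, _ => 0
  | n + 1, s => (if pvWnd f s = 0 then 1 else 0) + pvSpecC f n (s + 1)

theorem pv_foldl_ext {α β : Type} (F G : α → β → α) (h : ∀ a x, F a x = G a x) :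
    ∀ (l : List β) (init : α), l.foldl F init = l.foldl G init := by
  intro l
  induction l with
  | nil => intro init; rfl
  | cons x xs ih => intro init; simp only [List.foldl_cons, h]; exact ih _

theorem pv_range4 (s : Int) : PySem.List.pyRange s (s + 4) 1 = [s, s + 1, s + 2, s + 3] := by
  rw [PySem.List.pyRange_one_cons (by omega), PySem.List.pyRange_one_cons (by omega),
      PySem.List.pyRange_one_cons (by omega), PySem.List.pyRange_one_cons (by omega),
      PySem.List.pyRange_one_eq_nil (by omega)]
  norm_num
  omega

-- A's innermost loop decides "window at s is all good"
theorem pv_vrika (f : Int → Prop) [DecidablePred f] (s : Int) :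
    ((PySem.List.pyRange s (s + 4) 1).foldl (fun v j2 => if f j2 then false else v) true)
      = decide (pvWnd f s = 0) := by
  rw [pv_range4]
  simp only [List.foldl_cons, List.foldl_nil, pvWnd]
  by_cases h0 : f s <;> by_cases h1 : f (s + 1) <;> by_cases h2 : f (s + 2) <;>
    by_cases h3 : f (s + 3) <;> simp [h0, h1, h2, h3]

-- A's middle loop counts all-good windows
theorem pv_A_col (f : Int → Prop) [DecidablePred f] (n : Nat) :
    ∀ (s cnt : Int),
      ((PySem.List.pyRange s (s + n) 1).foldl (fun cnt j1 =>
        let vrika := (PySem.List.pyRange j1 (j1 + 4) 1).foldl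
            (fun v j2 => if f j2 then false else v) true
        if vrika = true then cnt + 1 else cnt) cnt)
      = cnt + pvSpecC f n s := by
  induction n with
  | zero => intro s cnt; rw [PySem.List.pyRange_one_eq_nil (by omega)]; simp [pvSpecC]
  | succ n ih =>
    intro s cnt
    rw [PySem.List.pyRange_one_cons (by push_cast; omega)]
    simp only [List.foldl_cons]
    have harg : s + 1 + (n : Int) = s + ((n : Nat) + 1 : Nat) := by push_cast; ring
    rw [show (PySem.List.pyRange (s + 1) (s + ((n : Nat) + 1 : Nat)) 1)
          = PySem.List.pyRange (s + 1) (s + 1 + (n : Int)) 1 by rw [harg]] at *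
    rw [ih (s + 1)]
    simp only [pvSpecC, pv_vrika]
    by_cases h : pvWnd f s = 0 <;> simp [h] <;> ring

-- B's initial loop computes the bad count of the first window
theorem pv_B_init (f : Int → Prop) [DecidablePred f] :
    ((PySem.List.pyRange 0 4 1).foldl (fun bad i => if f i then bad + 1 else bad) (0 : Int))
      = pvWnd f 0 := by
  rw [show (PySem.List.pyRange 0 4 1) = PySem.List.pyRange 0 (0 + 4) 1 by norm_num, pv_range4]
  simp only [List.foldl_cons, List.foldl_nil, pvWnd, zero_add]
  by_cases h0 : f 0 <;> by_cases h1 : f (1:Int) <;> by_cases h2 : f (2:Int) <;>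
    by_cases h3 : f (3:Int) <;> simp [h0, h1, h2, h3] <;> ring

theorem pv_Wnd_slide (f : Int → Prop) [DecidablePred f] (s : Int) :
    pvWnd f (s + 1)
      = pvWnd f s - (if f s then 1 else 0) + (if f (s + 4) then 1 else 0) := by
  simp only [pvWnd]
  have h2 : s + 1 + 1 = s + 2 := by ring
  have h3 : s + 1 + 2 = s + 3 := by ring
  have h4 : s + 1 + 3 = s + 4 := by ring
  rw [h2, h3, h4]; ring

-- B's sliding loop: invariant "bad = bad count of the window ending at the previous row"
theorem pv_B_slide (f : Int → Prop) [DecidablePred f] (n : Nat) :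
    ∀ (i cnt : Int),
      ((PySem.List.pyRange i (i + n) 1).foldl (fun (p : Int × Int) k =>
          let bad := if f (k - 4) then p.2 - 1 else p.2
          let bad := if f k then bad + 1 else bad
          let cnt := if bad = 0 then p.1 + 1 else p.1
          (cnt, bad)) (cnt, pvWnd f (i - 4)))
      = (cnt + pvSpecC f n (i - 3), pvWnd f (i + n - 4)) := by
  induction n with
  | zero => intro i cnt; rw [PySem.List.pyRange_one_eq_nil (by omega)]; simp [pvSpecC]
  | succ n ih =>
    intro i cnt
    rw [PySem.List.pyRange_one_cons (by push_cast; omega)]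
    simp only [List.foldl_cons]
    have hbad : (if f i then (if f (i - 4) then pvWnd f (i - 4) - 1 else pvWnd f (i - 4)) + 1
          else (if f (i - 4) then pvWnd f (i - 4) - 1 else pvWnd f (i - 4))) = pvWnd f (i - 3) := by
      have := pv_Wnd_slide f (i - 4)
      have e1 : i - 4 + 1 = i - 3 := by ring
      have e2 : i - 4 + 4 = i := by ring
      rw [e1, e2] at this
      by_cases h0 : f (i - 4) <;> by_cases h1 : f i <;> simp [h0, h1, this] <;> ring
    have harg : i + 1 + (n : Int) = i + ((n : Nat) + 1 : Nat) := by push_cast; ring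
    rw [show (PySem.List.pyRange (i + 1) (i + ((n : Nat) + 1 : Nat)) 1)
          = PySem.List.pyRange (i + 1) (i + 1 + (n : Int)) 1 by rw [harg]]
    have hstart : (i + 1) - 4 = i - 3 := by ring
    simp only [hbad]
    have := ih (i + 1) (if pvWnd f (i - 3) = 0 then cnt + 1 else cnt)
    rw [hstart] at this
    rw [this]
    have e3 : i + 1 - 3 = i - 2 := by ring
    have e4 : i + 1 + (n : Int) - 4 = i + ((n : Nat) + 1 : Nat) - 4 := by push_cast; ring
    rw [e3, e4]
    simp only [pvSpecC]
    have e5 : i - 3 + 1 = i - 2 := by ring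
    rw [e5]
    by_cases h : pvWnd f (i - 3) = 0 <;> simp [h] <;> ring

-- per column, A's body and B's body add the same amount
theorem pv_col_eq (f : Int → Prop) [DecidablePred f] (d cnt : Int) (hd : 4 ≤ d) :
    ((PySem.List.pyRange 0 (d - 3) 1).foldl (fun cnt j1 =>
        let vrika := (PySem.List.pyRange j1 (j1 + 4) 1).foldl
            (fun v j2 => if f j2 then false else v) true
        if vrika = true then cnt + 1 else cnt) cnt)
    = (let bad : Int := (PySem.List.pyRange 0 4 1).foldl
          (fun bad i => if f i then bad + 1 else bad) 0
       let cnt := if bad = 0 then cnt + 1 else cnt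
       let p := (PySem.List.pyRange 4 d 1).foldl (fun (p : Int × Int) k =>
          let bad := if f (k - 4) then p.2 - 1 else p.2
          let bad := if f k then bad + 1 else bad
          let cnt := if bad = 0 then p.1 + 1 else p.1
          (cnt, bad)) (cnt, bad)
       p.1) := by
  have hA := pv_A_col f (d - 3).toNat 0 cnt
  rw [show (0 : Int) + ((d - 3).toNat : Int) = d - 3 by omega] at hA
  rw [hA]
  simp only [pv_B_init]
  have h40 : (4 : Int) - 4 = 0 := by norm_num
  have hB := pv_B_slide f (d - 4).toNat 4 (if pvWnd f 0 = 0 then cnt + 1 else cnt)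
  rw [show (4 : Int) + ((d - 4).toNat : Int) = d by omega, h40] at hB
  rw [hB]
  have hn : (d - 3).toNat = (d - 4).toNat + 1 := by omega
  rw [hn]
  simp only [pvSpecC]
  have e : (0 : Int) + 1 = 1 := by norm_num
  rw [e, show (4 : Int) - 3 = 1 by norm_num]
  by_cases h : pvWnd f 0 = 0 <;> simp [h] <;> ring

theorem pv_A_small (tetrag : List (List Int)) (diast : Int) (h : diast < 4) :
    check_katheta tetrag diast = 0 := by
  unfold check_katheta
  have hnil : PySem.List.pyRange 0 (diast - 3) 1 = [] :=
    PySem.List.pyRange_one_eq_nil (by omega)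
  rw [pv_foldl_ext _ (fun (cnt : Int) (_ : Int) => cnt) (by intro a x; rw [hnil]; rfl)]
  induction PySem.List.pyRange 0 diast 1 with
  | nil => rfl
  | cons y ys ih => simpa using ih

-- ===== VERDICT (by name: the statement is the Claim_ definition above) =====
theorem check_katheta_spec : Claim_equal_check_katheta := by
  intro tetrag diast _ _
  unfold Spec_check_katheta
  by_cases h : diast < 4
  · rw [pv_A_small tetrag diast h]
    unfold check_katheta_alt
    rw [if_pos h]
  · unfold check_katheta check_katheta_alt
    rw [if_neg h]
    apply pv_foldl_ext
    intro cnt j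
    exact pv_col_eq (fun r => PySem.Int.floordiv (pvCellA tetrag r j) 10 ≠ 0) diast cnt (by omega)
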